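-- pv_equiv track=rewrite | github.com/ceebo/glider_synth | sl_from_code.py | decodeCanon
-- ===== SOURCE A (Python) =====
-- chars = "0123456789abcdefghijklmnopqrstuvwxyz"
--
-- def decodeCanon(apgcode):
--
--     blank = False
--     x = y = 0
--     clist = []
--
--     for c in apgcode[apgcode.find("_")+1:]:
--         if blank:
--             x += chars.index(c)
--             blank = False
--         else:
--             if (c == 'y'):
--                 x += 4
--                 blank = True
--             elif (c == 'x'):
--                 x += 3
--             elif (c == 'w'):
--                 x += 2
--             elif (c == 'z'):
--                 x = 0
--                 y += 5
--             else:
--                 v = chars.index(c)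
--                 for i in range(5):
--                     if v & (1 << i):
--                         clist += [x, y+i]
--                 x += 1
--
--     return clist
-- ===== SOURCE B (Python) =====
-- chars = "0123456789abcdefghijklmnopqrstuvwxyz"
--
-- def decodeCanon(apgcode):
--     s = apgcode[apgcode.find("_")+1:]
--     # Pass 1: tokenize; a 'y' consumes the next char from the iterator as its run length.
--     tokens = []
--     it = iter(s)
--     for c in it:
--         if c == 'y':
--             d = next(it, None)
--             tokens.append(('s', 4 if d is None else 4 + chars.index(d)))
--         elif c == 'x':
--             tokens.append(('s', 3))
--         elif c == 'w':
--             tokens.append(('s', 2))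
--         elif c == 'z':
--             tokens.append(('z', 0))
--         else:
--             tokens.append(('d', chars.index(c)))
--     # Pass 2: assign a coordinate to every digit token.
--     placed = []
--     x = y = 0
--     for kind, n in tokens:
--         if kind == 's':
--             x += n
--         elif kind == 'z':
--             x, y = 0, y + 5
--         else:
--             placed.append((x, y, n))
--             x += 1
--     # Pass 3: expand each placed digit into its set-bit cells.
--     return [u for (px, py, v) in placed
--               for b in range(5) if v & (1 << b)
--               for u in (px, py + b)]
-- ===== Notes on version B (the rewrite author's own statement) =====
-- stated objective: alternative
-- what changed: Replaces A's single-pass blank-flag state machine that emits cells inline by a three-stage pipeline: tokenize the string into skip/newrow/digit tokens (a 'y' consumes its run-length character from the iterator), then a placement pass assigning an (x,y) coordinate to each digit token, then a comprehension expanding each placed digit's set bits into cells.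
import Mathlib
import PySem

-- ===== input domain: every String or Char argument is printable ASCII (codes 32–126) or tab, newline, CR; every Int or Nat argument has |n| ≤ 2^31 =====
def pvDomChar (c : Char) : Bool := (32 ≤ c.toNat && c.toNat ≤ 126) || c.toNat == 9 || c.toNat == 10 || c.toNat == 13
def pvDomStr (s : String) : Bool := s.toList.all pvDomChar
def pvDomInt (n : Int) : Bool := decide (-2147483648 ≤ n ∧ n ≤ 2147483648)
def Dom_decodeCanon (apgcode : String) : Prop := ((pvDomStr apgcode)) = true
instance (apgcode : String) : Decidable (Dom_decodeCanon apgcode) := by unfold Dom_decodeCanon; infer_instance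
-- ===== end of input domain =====

-- B replaces A's single-pass blank-flag state machine by a three-stage pipeline
-- (tokenize, place coordinates, expand bits); alternative decomposition, return value only.

-- shared module constant: chars = "0123456789abcdefghijklmnopqrstuvwxyz"
def pvChars : List Char := "0123456789abcdefghijklmnopqrstuvwxyz".toList

-- chars.index(c); total stand-in (Python raises ValueError when c ∉ pvChars — excluded by Pre_)
def pvIdx (c : Char) : Int := (pvChars.idxOf c : Int)

-- the suffix apgcode[apgcode.find("_")+1:], as a char list
def pvSuffix (apgcode : String) : List Char :=
  PySem.List.slice apgcode.toList (some (PySem.Str.find apgcode "_" + 1)) none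

-- ===== PORT A =====
-- the inner 'for i in range(5): if v & (1 << i): clist += [x, y+i]'
def pvBits (v x y : Int) : List Int :=
  (List.range 5).foldl (fun acc (i : Nat) =>
    if PySem.Int.band v ((1:Int) <<< (i : Int)) ≠ 0 then acc ++ [x, y + (i : Int)] else acc) []

def stepA (st : Bool × Int × Int × List Int) (c : Char) : Bool × Int × Int × List Int :=
  match st with
  | (blank, x, y, cl) =>
    if blank then (false, x + pvIdx c, y, cl)
    else if c = 'y' then (true, x + 4, y, cl)
    else if c = 'x' then (false, x + 3, y, cl)
    else if c = 'w' then (false, x + 2, y, cl)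
    else if c = 'z' then (false, 0, y + 5, cl)
    else (false, x + 1, y, cl ++ pvBits (pvIdx c) x y)

def decodeCanon (apgcode : String) : List Int :=
  ((pvSuffix apgcode).foldl stepA (false, 0, 0, [])).2.2.2

-- ===== PORT B =====
-- Pass 1 tokens: ('s', n) skip, ('z', _) new row, ('d', v) digit
inductive PvTok
  | skip : Int → PvTok
  | newrow : PvTok
  | digit : Int → PvTok
deriving DecidableEq, Repr

-- Pass 1: the iterator loop; 'y' consumes the following char as its run length
def pvTokenize : List Char → List PvTok
  | [] => []
  | c :: rest =>
    if c = 'y' then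
      match rest with
      | [] => [PvTok.skip 4]
      | d :: rest' => PvTok.skip (4 + pvIdx d) :: pvTokenize rest'
    else if c = 'x' then PvTok.skip 3 :: pvTokenize rest
    else if c = 'w' then PvTok.skip 2 :: pvTokenize rest
    else if c = 'z' then PvTok.newrow :: pvTokenize rest
    else PvTok.digit (pvIdx c) :: pvTokenize rest

-- Pass 2: assign a coordinate to every digit token (state = x, y, placed)
def stepB (st : Int × Int × List (Int × Int × Int)) (t : PvTok) : Int × Int × List (Int × Int × Int) :=
  match st, t with
  | (x, y, p), PvTok.skip n => (x + n, y, p)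
  | (x, y, p), PvTok.newrow => (0, y + 5, p)
  | (x, y, p), PvTok.digit v => (x + 1, y, p ++ [(x, y, v)])

-- Pass 3: expand one placed digit into its set-bit cells
def pvEmit (t : Int × Int × Int) : List Int :=
  (List.range 5).flatMap (fun (b : Nat) =>
    if PySem.Int.band t.2.2 ((1:Int) <<< (b : Int)) ≠ 0 then [t.1, t.2.1 + (b : Int)] else [])

def decodeCanon_alt (apgcode : String) : List Int :=
  (((pvTokenize (pvSuffix apgcode)).foldl stepB (0, 0, [])).2.2).flatMap pvEmit

-- ===== PRECONDITION & SPEC =====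
-- Pre_ excludes exactly the inputs where Python's chars.index raises ValueError:
-- some character after the first '_' is not one of "0123456789abcdefghijklmnopqrstuvwxyz".
def Pre_decodeCanon (apgcode : String) : Prop :=
  ((pvSuffix apgcode).all (fun c => pvChars.contains c)) = true
instance (apgcode : String) : Decidable (Pre_decodeCanon apgcode) := by unfold Pre_decodeCanon; infer_instance

def pvWitness_decodeCanon : String := "xs2_4a4z4a4"

def Spec_decodeCanon (apgcode : String) (out : List Int) : Prop := out = decodeCanon_alt apgcode
instance (apgcode : String) (out : List Int) : Decidable (Spec_decodeCanon apgcode out) := by unfold Spec_decodeCanon; infer_instance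

-- ===== CLAIM (what is proved, stated in full; the proofs are below) =====
def Claim_equal_decodeCanon : Prop := ∀ (apgcode : String), Dom_decodeCanon apgcode → Pre_decodeCanon apgcode → Spec_decodeCanon apgcode (decodeCanon apgcode)

-- ===== LEMMAS AND PROOFS =====

-- A's inner bit loop equals B's comprehension over the set bits
theorem pvBits_eq_emit (v x y : Int) : pvBits v x y = pvEmit (x, y, v) := by
  simp only [pvBits, pvEmit]
  rw [show List.range 5 = [0,1,2,3,4] from rfl]
  simp only [List.flatMap_cons, List.flatMap_nil, List.foldl_cons, List.foldl_nil]
  split_ifs <;> simp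

-- B's placement fold accumulates on the right
theorem foldB_acc (ts : List PvTok) : ∀ (x y : Int) (p : List (Int × Int × Int)),
    (ts.foldl stepB (x, y, p)).2.2 = p ++ (ts.foldl stepB (x, y, [])).2.2 := by
  induction ts with
  | nil => simp
  | cons t ts ih =>
    intro x y p
    cases t with
    | skip n => simpa using ih (x + n) y p
    | newrow => simpa using ih 0 (y + 5) p
    | digit v =>
      simp only [List.foldl_cons, stepB, List.nil_append]
      rw [ih (x + 1) y (p ++ [(x, y, v)]), ih (x + 1) y [(x, y, v)]]
      simp

-- main correspondence: A's state machine vs tokenize-place-emit, in both flag states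
theorem foldA_eq_pipeline (l : List Char) :
    (∀ (x y : Int) (acc : List Int),
      (l.foldl stepA (false, x, y, acc)).2.2.2 =
        acc ++ (((pvTokenize l).foldl stepB (x, y, [])).2.2).flatMap pvEmit) ∧
    (∀ (x y : Int) (acc : List Int),
      (l.foldl stepA (true, x, y, acc)).2.2.2 =
        acc ++ (match l with
          | [] => []
          | d :: rest => (((pvTokenize rest).foldl stepB (x + pvIdx d, y, [])).2.2).flatMap pvEmit)) := by
  induction l with
  | nil => exact ⟨fun x y acc => by simp [pvTokenize], fun x y acc => by simp⟩
  | cons c rest ih =>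
    constructor
    · intro x y acc
      by_cases hy : c = 'y'
      · subst hy
        simp only [List.foldl_cons]
        rw [show stepA (false, x, y, acc) 'y' = (true, x + 4, y, acc) from rfl]
        rw [ih.2]
        cases rest with
        | nil =>
          rw [show pvTokenize ['y'] = [PvTok.skip 4] from rfl]
          simp [stepB]
        | cons d rest' =>
          rw [show pvTokenize ('y' :: d :: rest') = PvTok.skip (4 + pvIdx d) :: pvTokenize rest' from rfl]
          simp only [List.foldl_cons]
          rw [show stepB (x, y, ([] : List (Int × Int × Int))) (PvTok.skip (4 + pvIdx d))
                = (x + (4 + pvIdx d), y, []) from rfl]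
          rw [show x + 4 + pvIdx d = x + (4 + pvIdx d) from by ring]
      · by_cases hx : c = 'x'
        · subst hx
          simp only [List.foldl_cons]
          rw [show stepA (false, x, y, acc) 'x' = (false, x + 3, y, acc) from rfl]
          rw [ih.1]
          rw [show pvTokenize ('x' :: rest) = PvTok.skip 3 :: pvTokenize rest from by rw [pvTokenize.eq_def]; rfl]
          simp only [List.foldl_cons]
          rw [show stepB (x, y, ([] : List (Int × Int × Int))) (PvTok.skip 3) = (x + 3, y, []) from rfl]
        · by_cases hw : c = 'w'
          · subst hw
            simp only [List.foldl_cons]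
            rw [show stepA (false, x, y, acc) 'w' = (false, x + 2, y, acc) from rfl]
            rw [ih.1]
            rw [show pvTokenize ('w' :: rest) = PvTok.skip 2 :: pvTokenize rest from by rw [pvTokenize.eq_def]; rfl]
            simp only [List.foldl_cons]
            rw [show stepB (x, y, ([] : List (Int × Int × Int))) (PvTok.skip 2) = (x + 2, y, []) from rfl]
          · by_cases hz : c = 'z'
            · subst hz
              simp only [List.foldl_cons]
              rw [show stepA (false, x, y, acc) 'z' = (false, 0, y + 5, acc) from rfl]
              rw [ih.1]
              rw [show pvTokenize ('z' :: rest) = PvTok.newrow :: pvTokenize rest from by rw [pvTokenize.eq_def]; rfl]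
              simp only [List.foldl_cons]
              rw [show stepB (x, y, ([] : List (Int × Int × Int))) PvTok.newrow = (0, y + 5, []) from rfl]
            · simp only [List.foldl_cons]
              rw [show stepA (false, x, y, acc) c
                    = (false, x + 1, y, acc ++ pvBits (pvIdx c) x y) from by
                simp only [stepA, if_neg (by simp : ¬(false = true)),
                           if_neg hy, if_neg hx, if_neg hw, if_neg hz]]
              rw [ih.1]
              rw [show pvTokenize (c :: rest) = PvTok.digit (pvIdx c) :: pvTokenize rest from by
                rw [pvTokenize.eq_def]
                simp only [if_neg hy, if_neg hx, if_neg hw, if_neg hz]]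
              simp only [List.foldl_cons]
              rw [show stepB (x, y, ([] : List (Int × Int × Int))) (PvTok.digit (pvIdx c))
                    = (x + 1, y, [] ++ [(x, y, pvIdx c)]) from rfl]
              simp only [List.nil_append]
              rw [foldB_acc (pvTokenize rest) (x + 1) y [(x, y, pvIdx c)]]
              rw [pvBits_eq_emit]
              simp [List.append_assoc]
    · intro x y acc
      simp only [List.foldl_cons]
      rw [show stepA (true, x, y, acc) c = (false, x + pvIdx c, y, acc) from rfl]
      exact ih.1 _ _ _

-- ===== VERDICT (by name: the statement is the Claim_ definition above) =====
theorem decodeCanon_spec : Claim_equal_decodeCanon := by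
  intro apgcode _ _
  unfold Spec_decodeCanon decodeCanon decodeCanon_alt
  rw [(foldA_eq_pipeline (pvSuffix apgcode)).1 0 0 []]
  simp
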